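-- pv_equiv track=rewrite | github.com/Divyajyoti1801/Interview_Prepration | Data Structure and Algorithm/Hashing_Advance.py | longest_subarray_with_sum_1
-- ===== SOURCE A (Python) =====
-- def longest_subarray_with_sum_1(arr,sum):
--     n = len(arr)
--     res = 0
--     for i in range(n):
--         curr_sum = 0
--         for j in range(i,n):
--             curr_sum += arr[j]
--             if curr_sum == sum:
--                 res = max(res,j-i+1)
--     return res
-- ===== SOURCE B (Python) =====
-- def longest_subarray_with_sum_1(arr, sum):
--     # One pass: prefix sums + dict of the first index at which each prefix value occurs.
--     first = {0: 0}
--     prefix = 0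
--     res = 0
--     j = 0
--     for x in arr:
--         j += 1
--         prefix += x
--         need = prefix - sum
--         if need in first:
--             res = max(res, j - first[need])
--         if prefix not in first:
--             first[prefix] = j
--     return res
-- ===== Notes on version B (the rewrite author's own statement) =====
-- stated objective: faster
-- what changed: Replaced the quadratic all-subarrays double loop with a single pass over prefix sums keeping a hashmap of the first index of each prefix value.
import Mathlib
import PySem

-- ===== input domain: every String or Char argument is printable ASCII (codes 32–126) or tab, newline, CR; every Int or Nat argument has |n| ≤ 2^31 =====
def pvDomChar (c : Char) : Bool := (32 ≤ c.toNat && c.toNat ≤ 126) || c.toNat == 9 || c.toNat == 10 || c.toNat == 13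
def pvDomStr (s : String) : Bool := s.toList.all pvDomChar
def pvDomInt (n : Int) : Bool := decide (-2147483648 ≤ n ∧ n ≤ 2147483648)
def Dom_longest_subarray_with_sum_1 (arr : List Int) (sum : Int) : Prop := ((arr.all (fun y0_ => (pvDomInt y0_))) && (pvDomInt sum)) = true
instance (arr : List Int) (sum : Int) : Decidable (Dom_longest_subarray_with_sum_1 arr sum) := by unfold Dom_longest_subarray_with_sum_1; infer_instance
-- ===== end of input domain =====

-- B replaces A's quadratic double loop with one prefix-sum pass over the list keeping a
-- dict of the first index of each prefix value (asymptotically faster, O(n) vs O(n^2)).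

-- ===== PORT A =====
-- inner-loop body of A: curr_sum += arr[j]; if curr_sum == sum: res = max(res, j-i+1)
def pvStepA (arr : List Int) (sum i : Int) (st : Int × Int) (j : Int) : Int × Int :=
  let curr_sum := st.1 + PySem.List.pyGetD arr j 0
  if curr_sum = sum then (curr_sum, max st.2 (j - i + 1)) else (curr_sum, st.2)

def longest_subarray_with_sum_1 (arr : List Int) (sum : Int) : Int :=
  let n := PySem.List.len arr
  (PySem.List.pyRange 0 n 1).foldl
    (fun res i => ((PySem.List.pyRange i n 1).foldl (pvStepA arr sum i) (0, res)).2) 0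

-- ===== PORT B =====
-- loop body of B: j += 1; prefix += x; if prefix-sum in first: res = max(res, j - first[prefix-sum]);
-- if prefix not in first: first[prefix] = j.  State = (first, prefix, res, j).
def pvStepB (sum : Int) (st : PySem.Dict Int Int × Int × Int × Int) (x : Int) :
    PySem.Dict Int Int × Int × Int × Int :=
  let first := st.1
  let pfx := st.2.1 + x
  let j := st.2.2.2 + 1
  let need := pfx - sum
  let res := if first.contains need then max st.2.2.1 (j - first.getD need 0) else st.2.2.1
  let first' := if first.contains pfx then first else first.insert pfx j
  (first', pfx, res, j)

def longest_subarray_with_sum_1_alt (arr : List Int) (sum : Int) : Int :=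
  (arr.foldl (pvStepB sum) (PySem.Dict.empty.insert 0 0, 0, 0, 0)).2.2.1

-- ===== PRECONDITION & SPEC =====
def Spec_longest_subarray_with_sum_1 (arr : List Int) (sum : Int) (out : Int) : Prop := out = longest_subarray_with_sum_1_alt arr sum
instance (arr : List Int) (sum : Int) (out : Int) : Decidable (Spec_longest_subarray_with_sum_1 arr sum out) := by unfold Spec_longest_subarray_with_sum_1; infer_instance

-- ===== CLAIM (what is proved, stated in full; the proofs are below) =====
def Claim_equal_longest_subarray_with_sum_1 : Prop := ∀ (arr : List Int) (sum : Int), Dom_longest_subarray_with_sum_1 arr sum → Spec_longest_subarray_with_sum_1 arr sum (longest_subarray_with_sum_1 arr sum)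

-- ===== LEMMAS AND PROOFS =====

-- prefix sum of the first k elements
def pvP (arr : List Int) (k : Nat) : Int := (arr.take k).sum

-- the subarray arr[i:j] (i < j ≤ len) sums to `sum`
def pvGood (arr : List Int) (sum : Int) (i j : Nat) : Prop :=
  i < j ∧ j ≤ arr.length ∧ pvP arr j - pvP arr i = sum

-- r is the length of the longest subarray with the given sum (0 if none)
def pvIsMax (arr : List Int) (sum r : Int) : Prop :=
  0 ≤ r ∧ (r = 0 ∨ ∃ i j, pvGood arr sum i j ∧ r = (j : Int) - (i : Int)) ∧
  ∀ i j, pvGood arr sum i j → (j : Int) - (i : Int) ≤ r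

lemma pvP_succ (arr : List Int) (k : Nat) (hk : k < arr.length) :
    pvP arr (k + 1) = pvP arr k + arr[k] := by
  unfold pvP
  rw [List.take_add_one, List.getElem?_eq_getElem hk]
  simp only [Option.toList_some, List.sum_append, List.sum_cons, List.sum_nil]
  ring

lemma pvIsMax_unique (arr : List Int) (sum r1 r2 : Int)
    (h1 : pvIsMax arr sum r1) (h2 : pvIsMax arr sum r2) : r1 = r2 := by
  obtain ⟨n1, a1, b1⟩ := h1
  obtain ⟨n2, a2, b2⟩ := h2
  apply le_antisymm
  · rcases a1 with h | ⟨i, j, hg, he⟩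
    · omega
    · exact he ▸ b2 i j hg
  · rcases a2 with h | ⟨i, j, hg, he⟩
    · omega
    · exact he ▸ b1 i j hg

-- the inner loop of A, started at index a with state (c, r)
def pvRunA (arr : List Int) (sum i a c r : Int) : Int :=
  ((PySem.List.pyRange a (arr.length : Int) 1).foldl (pvStepA arr sum i) (c, r)).2

lemma pvInnerA (arr : List Int) (sum i : Int) (hi0 : 0 ≤ i) :
    ∀ (m : Nat) (a : Int), i ≤ a → a + (m : Int) = arr.length → ∀ c r : Int,
      c = pvP arr a.toNat - pvP arr i.toNat →
      r ≤ pvRunA arr sum i a c r ∧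
      (pvRunA arr sum i a c r = r ∨
        ∃ j : Nat, a < (j : Int) ∧ j ≤ arr.length ∧ pvP arr j - pvP arr i.toNat = sum ∧
          pvRunA arr sum i a c r = (j : Int) - i) ∧
      ∀ j : Nat, a < (j : Int) → j ≤ arr.length → pvP arr j - pvP arr i.toNat = sum →
        (j : Int) - i ≤ pvRunA arr sum i a c r := by
  intro m
  induction m with
  | zero =>
    intro a ha hlen c r hc
    have hnil : PySem.List.pyRange a (arr.length : Int) 1 = [] :=
      PySem.List.pyRange_one_eq_nil (by omega)
    unfold pvRunA
    rw [hnil]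
    refine ⟨le_refl _, Or.inl rfl, ?_⟩
    intro j hj1 hj2 _
    omega
  | succ m ih =>
    intro a ha hlen c r hc
    have ha0 : 0 ≤ a := le_trans hi0 ha
    have hab : a < (arr.length : Int) := by push_cast at hlen ⊢; omega
    have hcons : PySem.List.pyRange a (arr.length : Int) 1
        = a :: PySem.List.pyRange (a + 1) (arr.length : Int) 1 :=
      PySem.List.pyRange_one_cons hab
    have hget : PySem.List.pyGetD arr a 0 = arr[a.toNat]'(by omega) :=
      PySem.List.pyGetD_eq_getElem arr 0 ha0 (by simpa using hab)
    have htn : (a + 1).toNat = a.toNat + 1 := by omega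
    have hc' : c + PySem.List.pyGetD arr a 0
        = pvP arr ((a + 1).toNat) - pvP arr i.toNat := by
      rw [htn, pvP_succ arr a.toNat (by omega), hget, hc]; ring
    have hrw : ∀ r0 : Int, pvRunA arr sum i a c r0
        = pvRunA arr sum i (a + 1) (c + PySem.List.pyGetD arr a 0)
            (if c + PySem.List.pyGetD arr a 0 = sum then max r0 (a - i + 1) else r0) := by
      intro r0
      unfold pvRunA
      rw [hcons]
      simp only [List.foldl_cons, pvStepA]
      by_cases hcs : c + PySem.List.pyGetD arr a 0 = sum <;> simp [hcs]
    have hcast : ((a.toNat + 1 : Nat) : Int) = a + 1 := by omega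
    by_cases hcs : c + PySem.List.pyGetD arr a 0 = sum
    · -- the element at index a completes a subarray summing to `sum`
      obtain ⟨h1, h2, h3⟩ := ih (a + 1) (by omega) (by push_cast at hlen ⊢; omega)
        (c + PySem.List.pyGetD arr a 0) (max r (a - i + 1)) hc'
      rw [hrw r, if_pos hcs] at *
      have hgood : pvP arr (a.toNat + 1) - pvP arr i.toNat = sum := by
        rw [← htn, ← hc']; exact hcs
      refine ⟨le_trans (le_max_left _ _) h1, ?_, ?_⟩
      · rcases h2 with h | ⟨j, hj1, hj2, hj3, hj4⟩
        · rcases max_choice r (a - i + 1) with hm | hm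
          · exact Or.inl (by rw [h, hm])
          · exact Or.inr ⟨a.toNat + 1, by omega, by omega, hgood, by rw [h, hm]; omega⟩
        · exact Or.inr ⟨j, by omega, hj2, hj3, hj4⟩
      · intro j hj1 hj2 hj3
        by_cases hje : (j : Int) = a + 1
        · have : (j : Int) - i ≤ max r (a - i + 1) := le_trans (by omega) (le_max_right _ _)
          exact le_trans this h1
        · exact h3 j (by omega) hj2 hj3
    · -- no update at index a
      obtain ⟨h1, h2, h3⟩ := ih (a + 1) (by omega) (by push_cast at hlen ⊢; omega)
        (c + PySem.List.pyGetD arr a 0) r hc'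
      rw [hrw r, if_neg hcs] at *
      refine ⟨h1, ?_, ?_⟩
      · rcases h2 with h | ⟨j, hj1, hj2, hj3, hj4⟩
        · exact Or.inl h
        · exact Or.inr ⟨j, by omega, hj2, hj3, hj4⟩
      · intro j hj1 hj2 hj3
        by_cases hje : (j : Int) = a + 1
        · -- j = a+1 would make the current sum equal to `sum`, contradicting hcs
          exfalso
          apply hcs
          rw [hc', htn]
          have hjn : j = a.toNat + 1 := by omega
          rw [← hjn]
          exact hj3
        · exact h3 j (by omega) hj2 hj3

-- the outer loop of A, started at index b with accumulator r
def pvRunOuterA (arr : List Int) (sum b r : Int) : Int :=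
  (PySem.List.pyRange b (arr.length : Int) 1).foldl
    (fun res i =>
      ((PySem.List.pyRange i (arr.length : Int) 1).foldl (pvStepA arr sum i) (0, res)).2) r

lemma pvOuterA (arr : List Int) (sum : Int) :
    ∀ (m : Nat) (b : Int), 0 ≤ b → b + (m : Int) = arr.length → ∀ r : Int,
      r ≤ pvRunOuterA arr sum b r ∧
      (pvRunOuterA arr sum b r = r ∨
        ∃ i j : Nat, pvGood arr sum i j ∧ b ≤ (i : Int) ∧
          pvRunOuterA arr sum b r = (j : Int) - (i : Int)) ∧
      ∀ i j : Nat, b ≤ (i : Int) → pvGood arr sum i j →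
        (j : Int) - (i : Int) ≤ pvRunOuterA arr sum b r := by
  intro m
  induction m with
  | zero =>
    intro b hb hlen r
    have hnil : PySem.List.pyRange b (arr.length : Int) 1 = [] :=
      PySem.List.pyRange_one_eq_nil (by omega)
    unfold pvRunOuterA
    rw [hnil]
    refine ⟨le_refl _, Or.inl rfl, ?_⟩
    intro i j hi hg
    obtain ⟨h1, h2, _⟩ := hg
    omega
  | succ m ih =>
    intro b hb hlen r
    have hbl : b < (arr.length : Int) := by push_cast at hlen ⊢; omega
    have hcons : PySem.List.pyRange b (arr.length : Int) 1
        = b :: PySem.List.pyRange (b + 1) (arr.length : Int) 1 :=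
      PySem.List.pyRange_one_cons hbl
    obtain ⟨g1, g2, g3⟩ := pvInnerA arr sum b hb (m + 1) b (le_refl b)
      (by push_cast at hlen ⊢; omega) 0 r (by ring)
    set r1 := pvRunA arr sum b b 0 r with hr1
    have hrw : pvRunOuterA arr sum b r = pvRunOuterA arr sum (b + 1) r1 := by
      unfold pvRunOuterA
      rw [hcons]
      simp only [List.foldl_cons]
      rfl
    obtain ⟨h1, h2, h3⟩ := ih (b + 1) (by omega) (by push_cast at hlen ⊢; omega) r1
    rw [hrw]
    refine ⟨le_trans g1 h1, ?_, ?_⟩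
    · rcases h2 with h | ⟨i, j, hg, hbi, he⟩
      · rcases g2 with g | ⟨j, hj1, hj2, hj3, hj4⟩
        · exact Or.inl (by rw [h, g])
        · exact Or.inr ⟨b.toNat, j, ⟨by omega, hj2, hj3⟩, by omega, by rw [h, hj4]; omega⟩
      · exact Or.inr ⟨i, j, hg, by omega, he⟩
    · intro i j hi hg
      by_cases hie : (i : Int) = b
      · have hib : i = b.toNat := by omega
        obtain ⟨w1, w2, w3⟩ := hg
        have := g3 j (by omega) w2 (by rw [← hib]; exact w3)
        omega
      · exact h3 i j (by omega) hg

lemma pvA_isMax (arr : List Int) (sum : Int) :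
    pvIsMax arr sum (longest_subarray_with_sum_1 arr sum) := by
  have hport : longest_subarray_with_sum_1 arr sum = pvRunOuterA arr sum 0 0 := by
    simp only [longest_subarray_with_sum_1, PySem.List.len_eq, pvRunOuterA]
  obtain ⟨h1, h2, h3⟩ := pvOuterA arr sum arr.length 0 (by omega) (by omega) 0
  rw [hport]
  refine ⟨h1, ?_, ?_⟩
  · rcases h2 with h | ⟨i, j, hg, _, he⟩
    · exact Or.inl h
    · exact Or.inr ⟨i, j, hg, he⟩
  · intro i j hg
    exact h3 i j (by omega) hg

-- dict invariant: `d` maps each prefix value occurring among pvP arr 0..k to its first index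
def pvDInv (arr : List Int) (k : Nat) (d : PySem.Dict Int Int) : Prop :=
  ∀ v t, d.get? v = some t ↔
    ∃ m : Nat, m ≤ k ∧ t = (m : Int) ∧ pvP arr m = v ∧ ∀ m' : Nat, m' < m → pvP arr m' ≠ v

lemma pvDInv_contains (arr : List Int) (k : Nat) (d : PySem.Dict Int Int)
    (h : pvDInv arr k d) (v : Int) :
    d.contains v = true ↔ ∃ m : Nat, m ≤ k ∧ pvP arr m = v := by
  rw [PySem.Dict.contains_eq_isSome_get?]
  constructor
  · intro hs
    obtain ⟨t, ht⟩ := Option.isSome_iff_exists.mp hs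
    obtain ⟨m, hm1, _, hm3, _⟩ := (h v t).mp ht
    exact ⟨m, hm1, hm3⟩
  · rintro ⟨m, hm1, hm2⟩
    have hex : ∃ m', pvP arr m' = v := ⟨m, hm2⟩
    have hle : Nat.find hex ≤ m := Nat.find_min' hex hm2
    rw [(h v ((Nat.find hex : Nat) : Int)).mpr
      ⟨Nat.find hex, le_trans hle hm1, rfl, Nat.find_spec hex,
        fun m' hm' => Nat.find_min hex hm'⟩]
    rfl

lemma pvB_main (arr : List Int) (sum : Int) :
    ∀ (l : List Int) (k : Nat) (st : PySem.Dict Int Int × Int × Int × Int),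
      arr.drop k = l →
      st.2.2.2 = (k : Int) →
      st.2.1 = pvP arr k →
      pvDInv arr k st.1 →
      0 ≤ st.2.2.1 →
      (st.2.2.1 = 0 ∨ ∃ i j : Nat, pvGood arr sum i j ∧ j ≤ k ∧
        st.2.2.1 = (j : Int) - (i : Int)) →
      (∀ i j : Nat, pvGood arr sum i j → j ≤ k → (j : Int) - (i : Int) ≤ st.2.2.1) →
      pvIsMax arr sum ((l.foldl (pvStepB sum) st)).2.2.1 := by
  intro l
  induction l with
  | nil =>
    intro k st hd _ _ _ h0 hatt hbnd
    have hlk : arr.length ≤ k := by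
      have := congrArg List.length hd
      simp at this
      omega
    simp only [List.foldl_nil]
    refine ⟨h0, ?_, ?_⟩
    · rcases hatt with h | ⟨i, j, hg, _, he⟩
      · exact Or.inl h
      · exact Or.inr ⟨i, j, hg, he⟩
    · intro i j hg
      exact hbnd i j hg (by obtain ⟨_, h2, _⟩ := hg; omega)
  | cons x l' ih =>
    intro k st hd hj hp hDInv h0 hatt hbnd
    have hk : k < arr.length := by
      have := congrArg List.length hd
      simp at this
      omega
    have hx : arr[k] = x := by
      have h1 : (arr.drop k)[0]'(by rw [hd]; simp) = x := by simp [hd]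
      simpa [List.getElem_drop] using h1
    have hd' : arr.drop (k + 1) = l' := by
      have := congrArg List.tail hd
      rwa [List.tail_drop] at this
    have hp' : st.2.1 + x = pvP arr (k + 1) := by
      rw [pvP_succ arr k hk, hx, hp]
    simp only [List.foldl_cons]
    -- the updated state
    set need := st.2.1 + x - sum with hneed
    have hstep : pvStepB sum st x =
        ((if st.1.contains (st.2.1 + x) then st.1
          else st.1.insert (st.2.1 + x) (st.2.2.2 + 1)),
         st.2.1 + x,
         (if st.1.contains need then max st.2.2.1 (st.2.2.2 + 1 - st.1.getD need 0)
          else st.2.2.1),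
         st.2.2.2 + 1) := rfl
    -- res invariants after the step
    have hres0 : 0 ≤ (pvStepB sum st x).2.2.1 := by
      rw [hstep]
      by_cases hcn : st.1.contains need
      · simp only [if_pos hcn]
        exact le_trans h0 (le_max_left _ _)
      · simp only [if_neg hcn]
        exact h0
    have hresAtt : (pvStepB sum st x).2.2.1 = 0 ∨
        ∃ i j : Nat, pvGood arr sum i j ∧ j ≤ k + 1 ∧
          (pvStepB sum st x).2.2.1 = (j : Int) - (i : Int) := by
      rw [hstep]
      by_cases hcn : st.1.contains need
      · simp only [if_pos hcn]
        have hs := hcn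
        rw [PySem.Dict.contains_eq_isSome_get?] at hs
        obtain ⟨t, ht⟩ := Option.isSome_iff_exists.mp hs
        obtain ⟨m0, hm1, hm2, hm3, _⟩ := (hDInv need t).mp ht
        have hget : st.1.getD need 0 = t := PySem.Dict.getD_of_get?_eq_some _ 0 ht
        rcases max_choice st.2.2.1 (st.2.2.2 + 1 - st.1.getD need 0) with hm | hm
        · rw [hm]
          rcases hatt with h | ⟨i, j, hg, hjk, he⟩
          · exact Or.inl h
          · exact Or.inr ⟨i, j, hg, by omega, he⟩
        · rw [hm, hget, hm2, hj]
          refine Or.inr ⟨m0, k + 1, ⟨by omega, by omega, ?_⟩, by omega, by push_cast; ring⟩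
          rw [hm3, ← hp']
          ring
      · simp only [if_neg hcn]
        rcases hatt with h | ⟨i, j, hg, hjk, he⟩
        · exact Or.inl h
        · exact Or.inr ⟨i, j, hg, by omega, he⟩
    have hresBnd : ∀ i j : Nat, pvGood arr sum i j → j ≤ k + 1 →
        (j : Int) - (i : Int) ≤ (pvStepB sum st x).2.2.1 := by
      intro i j hg hjk
      rw [hstep]
      obtain ⟨hg1, hg2, hg3⟩ := hg
      by_cases hje : j = k + 1
      · -- the new index closes the subarray: pvP arr i = need
        have hpi : pvP arr i = need := by
          rw [hje, ← hp'] at hg3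
          omega
        have hcn : st.1.contains need = true :=
          (pvDInv_contains arr k st.1 hDInv need).mpr ⟨i, by omega, hpi⟩
        simp only [if_pos hcn]
        have hs := hcn
        rw [PySem.Dict.contains_eq_isSome_get?] at hs
        obtain ⟨t, ht⟩ := Option.isSome_iff_exists.mp hs
        obtain ⟨m0, hm1, hm2, hm3, hm4⟩ := (hDInv need t).mp ht
        have hget : st.1.getD need 0 = t := PySem.Dict.getD_of_get?_eq_some _ 0 ht
        have hm0i : m0 ≤ i := by
          by_contra hlt
          exact hm4 i (by omega) hpi
        have : (j : Int) - (i : Int) ≤ st.2.2.2 + 1 - st.1.getD need 0 := by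
          rw [hget, hm2, hj]
          omega
        exact le_trans this (le_max_right _ _)
      · have hle : (j : Int) - (i : Int) ≤ st.2.2.1 :=
          hbnd i j ⟨hg1, hg2, hg3⟩ (by omega)
        by_cases hcn : st.1.contains need
        · simp only [if_pos hcn]
          exact le_trans hle (le_max_left _ _)
        · simp only [if_neg hcn]
          exact hle
    -- dict invariant after the step
    have hDInv' : pvDInv arr (k + 1) (pvStepB sum st x).1 := by
      rw [hstep]
      by_cases hcp : st.1.contains (st.2.1 + x)
      · simp only [if_pos hcp]
        intro v t
        constructor
        · intro h
          obtain ⟨m, hm1, hm2, hm3, hm4⟩ := (hDInv v t).mp h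
          exact ⟨m, by omega, hm2, hm3, hm4⟩
        · rintro ⟨m, hm1, hm2, hm3, hm4⟩
          have hmk : m ≤ k := by
            by_contra hgt
            have hmeq : m = k + 1 := by omega
            have hveq : v = st.2.1 + x := by rw [← hm3, hmeq, ← hp']
            obtain ⟨m0, hm01, hm02⟩ :=
              (pvDInv_contains arr k st.1 hDInv (st.2.1 + x)).mp hcp
            exact hm4 m0 (by omega) (by rw [hm02, ← hveq])
          exact (hDInv v t).mpr ⟨m, hmk, hm2, hm3, hm4⟩
      · simp only [if_neg hcp]
        have hnotk : ∀ m : Nat, m ≤ k → pvP arr m ≠ st.2.1 + x := by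
          intro m hm hcon
          exact hcp ((pvDInv_contains arr k st.1 hDInv (st.2.1 + x)).mpr ⟨m, hm, hcon⟩)
        intro v t
        rw [PySem.Dict.get?_insert]
        by_cases hv : v = st.2.1 + x
        · simp only [if_pos hv]
          constructor
          · intro h
            have ht : t = st.2.2.2 + 1 := by
              injection h with h'; omega
            refine ⟨k + 1, le_refl _, by rw [ht, hj]; push_cast; ring, by rw [hv, hp'], ?_⟩
            intro m' hm'
            rw [hv]
            exact hnotk m' (by omega)
          · rintro ⟨m, hm1, hm2, hm3, _⟩
            have hmeq : m = k + 1 := by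
              by_contra hne
              exact hnotk m (by omega) (by rw [hm3, hv])
            rw [hm2, hmeq, hj]
            norm_num
        · simp only [if_neg hv]
          constructor
          · intro h
            obtain ⟨m, hm1, hm2, hm3, hm4⟩ := (hDInv v t).mp h
            exact ⟨m, by omega, hm2, hm3, hm4⟩
          · rintro ⟨m, hm1, hm2, hm3, hm4⟩
            have hmk : m ≤ k := by
              by_contra hgt
              have hmeq : m = k + 1 := by omega
              exact hv (by rw [← hm3, hmeq, ← hp'])
            exact (hDInv v t).mpr ⟨m, hmk, hm2, hm3, hm4⟩
    have := ih (k + 1) (pvStepB sum st x) hd'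
      (by rw [hstep, hj]; push_cast; ring)
      (by rw [hstep]; exact hp')
      hDInv' hres0 hresAtt hresBnd
    exact this

lemma pvB_isMax (arr : List Int) (sum : Int) :
    pvIsMax arr sum (longest_subarray_with_sum_1_alt arr sum) := by
  have hDInv0 : pvDInv arr 0 (PySem.Dict.empty.insert 0 0) := by
    intro v t
    rw [PySem.Dict.get?_insert]
    by_cases hv : v = 0
    · simp only [if_pos hv]
      constructor
      · intro h
        have ht : t = 0 := by injection h with h'; omega
        exact ⟨0, le_refl _, by rw [ht]; simp, by rw [hv]; rfl, by omega⟩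
      · rintro ⟨m, hm1, hm2, _, _⟩
        have : m = 0 := by omega
        rw [hm2, this]
        rfl
    · simp only [if_neg hv, PySem.Dict.get?_empty]
      constructor
      · intro h; exact absurd h (by simp)
      · rintro ⟨m, hm1, _, hm3, _⟩
        have : m = 0 := by omega
        rw [this] at hm3
        exact absurd (by rw [← hm3]; rfl) hv
  exact pvB_main arr sum arr 0 (PySem.Dict.empty.insert 0 0, 0, 0, 0)
    (by rfl) (by rfl) (by rfl) hDInv0 (le_refl 0) (Or.inl rfl)
    (fun i j hg hj0 => by obtain ⟨h1, _, _⟩ := hg; omega)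

-- ===== VERDICT (by name: the statement is the Claim_ definition above) =====
theorem longest_subarray_with_sum_1_spec : Claim_equal_longest_subarray_with_sum_1 := by
  intro arr sum _
  unfold Spec_longest_subarray_with_sum_1
  exact pvIsMax_unique arr sum _ _ (pvA_isMax arr sum) (pvB_isMax arr sum)
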